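-- pv_equiv track=rewrite | github.com/hyunse0/Algorithm | PROGRAMMERS/네이버_1.py | solution
-- ===== SOURCE A (Python) =====
-- from itertools import combinations
--
-- def solution(prices, d, k):
--     prices.sort()
--
--     if prices[-1] - prices[0] <= d:
--         return sum(prices)//len(prices)
--
--     if prices[-2] - prices[1] <= d:
--         return sum(prices[1:-1])//(len(prices)-2)
--
--     min_price = float('inf')
--     for perm in set(combinations(prices, k)):
--         if max(perm) - min(perm) <= d:
--             min_price = min(min_price, sum(perm)//k)
--
--     if min_price < float('inf'):
--         return min_price
--
--     if len(prices)//2: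
--         return prices[len(prices)//2]
--
--     return prices[len(prices)//2-1]
-- ===== SOURCE B (Python) =====
-- def solution(prices, d, k):
--     # Return-value equivalent to A; B does not mutate `prices` (A sorts it in place).
--     s = sorted(prices)
--     n = len(s)
--     if s[-1] - s[0] <= d:
--         return sum(s) // n
--     if s[-2] - s[1] <= d:
--         return sum(s[1:-1]) // (n - 2)
--     best = None
--     for i in range(n - k + 1):
--         if s[i + k - 1] - s[i] <= d:
--             v = sum(s[i:i + k]) // k
--             if best is None or v < best:
--                 best = v
--     if best is not None:
--         return best
--     return s[n // 2]
-- ===== Notes on version B (the rewrite author's own statement) =====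
-- stated objective: faster
-- what changed: A enumerates all C(n,k) k-combinations of the sorted prices and takes the min floor-average of those with range <= d; B sorts once and scans only the n-k+1 consecutive k-windows (a cheapest valid k-subset is always consecutive), which is exact and exponentially fewer candidates.
-- outside the precondition, e.g. on solution([3, 7], 0, 1): A raises ZeroDivisionError, B raises ZeroDivisionError; on solution([5], -1, 1): A raises IndexError, B raises IndexError; on solution([], 0, 1): A raises IndexError, B raises IndexError
import Mathlib
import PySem

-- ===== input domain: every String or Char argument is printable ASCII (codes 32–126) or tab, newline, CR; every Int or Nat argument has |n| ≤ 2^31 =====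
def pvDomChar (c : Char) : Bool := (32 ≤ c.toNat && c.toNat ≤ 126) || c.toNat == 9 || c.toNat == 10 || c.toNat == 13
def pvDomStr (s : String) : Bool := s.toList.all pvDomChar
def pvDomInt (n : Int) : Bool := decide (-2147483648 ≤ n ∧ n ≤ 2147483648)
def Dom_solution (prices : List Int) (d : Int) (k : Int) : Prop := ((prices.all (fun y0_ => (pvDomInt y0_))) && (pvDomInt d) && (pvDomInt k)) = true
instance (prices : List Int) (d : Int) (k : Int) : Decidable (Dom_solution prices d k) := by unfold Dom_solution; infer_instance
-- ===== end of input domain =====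

-- B replaces A's scan of all C(n,k) k-combinations by a scan of the n-k+1 consecutive
-- k-windows of the sorted list (a cheapest valid k-subset is always consecutive).
-- A sorts `prices` in place; the equivalence proved here is about the RETURN value only
-- (B does not mutate its argument).

-- shared index helper: xs[i] (total; in range under Pre_)
def pvGet (xs : List Int) (i : Int) : Int := (PySem.List.pyGet? xs i).getD 0

-- ===== PORT A =====
def solution (prices : List Int) (d : Int) (k : Int) : Int :=
  let s := PySem.List.sorted prices (fun x => x) false
  if pvGet s (-1) - pvGet s 0 ≤ d then
    PySem.Int.floordiv s.sum (s.length : Int)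
  else if pvGet s (-2) - pvGet s 1 ≤ d then
    PySem.Int.floordiv (PySem.List.slice s (some 1) (some (-1))).sum ((s.length : Int) - 2)
  else
    -- min_price = inf … for perm in set(combinations(prices, k)) — modelled as Option Int
    let best := (PySem.Set.ofList (PySem.List.combinations s k.toNat)).foldl
      (fun acc perm =>
        if (PySem.List.max? perm (fun x => x)).getD 0 - (PySem.List.min? perm (fun x => x)).getD 0 ≤ d then
          some (match acc with
                | none => PySem.Int.floordiv perm.sum k
                | some m => min m (PySem.Int.floordiv perm.sum k))
        else acc) none
    match best with
    | some m => m
    | none =>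
      if PySem.Int.floordiv (s.length : Int) 2 ≠ 0 then
        pvGet s (PySem.Int.floordiv (s.length : Int) 2)
      else
        pvGet s (PySem.Int.floordiv (s.length : Int) 2 - 1)

-- ===== PORT B =====
def solution_alt (prices : List Int) (d : Int) (k : Int) : Int :=
  let s := PySem.List.sorted prices (fun x => x) false
  let n : Int := s.length
  if pvGet s (-1) - pvGet s 0 ≤ d then
    PySem.Int.floordiv s.sum n
  else if pvGet s (-2) - pvGet s 1 ≤ d then
    PySem.Int.floordiv (PySem.List.slice s (some 1) (some (-1))).sum (n - 2)
  else
    let best := (PySem.List.pyRange 0 (n - k + 1) 1).foldl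
      (fun acc i =>
        if pvGet s (i + k - 1) - pvGet s i ≤ d then
          let v := PySem.Int.floordiv (PySem.List.slice s (some i) (some (i + k))).sum k
          match acc with
          | none => some v
          | some m => if v < m then some v else some m
        else acc) none
    match best with
    | some m => m
    | none => pvGet s (PySem.Int.floordiv n 2)

-- ===== PRECONDITION & SPEC =====
-- Pre_ excludes exactly the inputs where the Python A raises: the empty list (IndexError),
-- a single price with d < 0 (IndexError on prices[-2]), a 2-element list on which A's second
-- branch fires and divides by len-2 = 0 (ZeroDivisionError), and k ≤ 0 when neither early
-- branch returns (ValueError from combinations / max of an empty tuple).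
def Pre_solution (prices : List Int) (d : Int) (k : Int) : Prop :=
  1 ≤ prices.length ∧
  (prices.length = 1 → 0 ≤ d) ∧
  ¬(prices.length = 2 ∧
      ¬(pvGet (PySem.List.sorted prices (fun x => x) false) (-1) -
          pvGet (PySem.List.sorted prices (fun x => x) false) 0 ≤ d) ∧
      pvGet (PySem.List.sorted prices (fun x => x) false) (-2) -
          pvGet (PySem.List.sorted prices (fun x => x) false) 1 ≤ d) ∧
  (1 ≤ k ∨
    pvGet (PySem.List.sorted prices (fun x => x) false) (-1) -
        pvGet (PySem.List.sorted prices (fun x => x) false) 0 ≤ d ∨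
    (2 ≤ prices.length ∧
      pvGet (PySem.List.sorted prices (fun x => x) false) (-2) -
          pvGet (PySem.List.sorted prices (fun x => x) false) 1 ≤ d))
instance (prices : List Int) (d : Int) (k : Int) : Decidable (Pre_solution prices d k) := by
  unfold Pre_solution; infer_instance

def pvWitness_solution : List Int × Int × Int := ([1, 5, 2, 8], 2, 2)

def Spec_solution (prices : List Int) (d : Int) (k : Int) (out : Int) : Prop := out = solution_alt prices d k
instance (prices : List Int) (d : Int) (k : Int) (out : Int) : Decidable (Spec_solution prices d k out) := by unfold Spec_solution; infer_instance

-- ===== CLAIM (what is proved, stated in full; the proofs are below) =====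
def Claim_equal_solution : Prop := ∀ (prices : List Int) (d : Int) (k : Int), Dom_solution prices d k → Pre_solution prices d k → Spec_solution prices d k (solution prices d k)

-- ===== LEMMAS AND PROOFS =====

-- the running minimum of a Python loop, with None for "not seen yet"
def minStep (acc : Option Int) (v : Int) : Option Int :=
  match acc with
  | none => some v
  | some m => some (min m v)

def optMin (l : List Int) : Option Int := l.foldl minStep none

theorem foldl_minStep_some (l : List Int) (a : Int) :
    l.foldl minStep (some a) = some (l.foldl min a) := by
  induction l generalizing a with
  | nil => rfl
  | cons x t ih => simpa [minStep] using ih (min a x)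

theorem optMin_cons (x : Int) (t : List Int) :
    optMin (x :: t) = some (t.foldl min x) := by
  simpa [optMin, minStep] using foldl_minStep_some t x

theorem min_facts (x : Int) (t : List Int) :
    t.foldl min x ∈ x :: t ∧ ∀ y ∈ x :: t, t.foldl min x ≤ y := by
  constructor
  · rcases PySem.List.foldl_min_mem t x with h | h
    · simp [h]
    · exact List.mem_cons_of_mem _ h
  · intro y hy
    rcases List.mem_cons.mp hy with rfl | hy
    · exact (PySem.List.foldl_min_le t y).1
    · exact (PySem.List.foldl_min_le t x).2 y hy

-- two candidate lists that dominate each other have the same running minimum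
theorem optMin_dominate (L1 L2 : List Int)
    (h1 : ∀ x ∈ L1, ∃ y ∈ L2, y ≤ x) (h2 : ∀ y ∈ L2, ∃ x ∈ L1, x ≤ y) :
    optMin L1 = optMin L2 := by
  match L1, L2 with
  | [], [] => rfl
  | [], y :: t2 =>
      obtain ⟨x, hx, -⟩ := h2 y (List.mem_cons_self ..)
      exact absurd hx List.not_mem_nil
  | x :: t1, [] =>
      obtain ⟨y, hy, -⟩ := h1 x (List.mem_cons_self ..)
      exact absurd hy List.not_mem_nil
  | x :: t1, y :: t2 =>
      rw [optMin_cons, optMin_cons]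
      obtain ⟨hm1, hle1⟩ := min_facts x t1
      obtain ⟨hm2, hle2⟩ := min_facts y t2
      congr 1
      apply le_antisymm
      · obtain ⟨u, hu, hule⟩ := h2 _ hm2
        exact le_trans (hle1 u hu) hule
      · obtain ⟨u, hu, hule⟩ := h1 _ hm1
        exact le_trans (hle2 u hu) hule

theorem getElem_idx_congr (s : List Int) {a b : Nat} (h : a = b) (ha : a < s.length) :
    s[a] = s[b]'(h ▸ ha) := by subst h; rfl

-- monotonicity of a sorted list by index
theorem sorted_getElem_mono {s : List Int} (hpw : s.Pairwise (· ≤ ·))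
    {i j : Nat} (hij : i ≤ j) (hj : j < s.length) : s[i]'(by omega) ≤ s[j] := by
  rcases Nat.eq_or_lt_of_le hij with rfl | hl
  · exact le_refl _
  · exact List.pairwise_iff_getElem.mp hpw i j (by omega) hj hl

theorem sorted_getElem_le_of_mem {s : List Int} (hpw : s.Pairwise (· ≤ ·))
    {y : Int} (hy : y ∈ s) (h : 0 < s.length) : s[0] ≤ y := by
  obtain ⟨i, hi, rfl⟩ := List.mem_iff_getElem.mp hy
  exact sorted_getElem_mono hpw (Nat.zero_le i) hi

theorem sorted_mem_le_getElem_last {s : List Int} (hpw : s.Pairwise (· ≤ ·))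
    {y : Int} (hy : y ∈ s) (h : 0 < s.length) : y ≤ s[s.length - 1]'(by omega) := by
  obtain ⟨i, hi, rfl⟩ := List.mem_iff_getElem.mp hy
  exact sorted_getElem_mono hpw (by omega) (by omega)

-- max(t) / min(t) of a sorted nonempty list are its last / first element
theorem maxD_sorted {w : List Int} (hpw : w.Pairwise (· ≤ ·)) (hne : 0 < w.length) :
    (PySem.List.max? w (fun x => x)).getD 0 = w[w.length - 1]'(by omega) := by
  match w with
  | w0 :: wt =>
    rw [PySem.List.max?_id_cons w0 wt]
    apply le_antisymm
    · rcases PySem.List.foldl_max_mem wt w0 with h | h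
      · rw [Option.getD_some, h]
        exact sorted_mem_le_getElem_last hpw (List.mem_cons_self ..) hne
      · exact sorted_mem_le_getElem_last hpw (List.mem_cons_of_mem _ h) hne
    · have hmem : (w0 :: wt)[(w0 :: wt).length - 1]'(by omega) ∈ w0 :: wt := List.getElem_mem _
      rcases List.mem_cons.mp hmem with h | h
      · rw [Option.getD_some, h]
        exact (PySem.List.le_foldl_max wt w0).1
      · exact (PySem.List.le_foldl_max wt w0).2 _ h

theorem minD_sorted {w : List Int} (hpw : w.Pairwise (· ≤ ·)) (hne : 0 < w.length) :
    (PySem.List.min? w (fun x => x)).getD 0 = w[0] := by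
  match w with
  | w0 :: wt =>
    rw [PySem.List.min?_id_cons w0 wt]
    apply le_antisymm
    · rw [Option.getD_some]
      simpa using (PySem.List.foldl_min_le wt w0).1
    · rw [Option.getD_some]
      rcases PySem.List.foldl_min_mem wt w0 with h | h
      · rw [h]; exact sorted_getElem_le_of_mem hpw (List.mem_cons_self ..) hne
      · exact sorted_getElem_le_of_mem hpw (List.mem_cons_of_mem _ h) hne

-- a sublist of a sorted list dominates the corresponding prefix pointwise
theorem sublist_getElem_ge {t u : List Int} (hsub : t.Sublist u) (hpw : u.Pairwise (· ≤ ·)) :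
    ∀ j (hj : j < t.length), u[j]'(by have := hsub.length_le; omega) ≤ t[j] := by
  induction hsub with
  | slnil => intro j hj; simp at hj
  | @cons t l₂ a h ih =>
      intro j hj
      have hlen := h.length_le
      have hpw' : l₂.Pairwise (· ≤ ·) := (List.pairwise_cons.mp hpw).2
      have hle : ∀ y ∈ l₂, a ≤ y := (List.pairwise_cons.mp hpw).1
      have step : (a :: l₂)[j]'(by simp; omega) ≤ l₂[j]'(by omega) := by
        match j with
        | 0 => exact hle _ (List.getElem_mem _)
        | m + 1 =>
            simp only [List.getElem_cons_succ]
            exact sorted_getElem_mono hpw' (by omega) (by omega)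
      exact step.trans (ih hpw' j hj)
  | @cons₂ t l₂ a h ih =>
      intro j hj
      match j with
      | 0 => simp
      | m + 1 =>
          simp only [List.getElem_cons_succ]
          exact ih (List.pairwise_cons.mp hpw).2 m (by simpa using hj)

-- every sublist of a sorted list is dominated by a consecutive window starting at its head
theorem window_dominates {t u : List Int} (hsub : t.Sublist u) (hpw : u.Pairwise (· ≤ ·))
    (hne : 0 < t.length) :
    ∃ i : Nat, ∃ _ : i + t.length ≤ u.length,
      u[i]'(by omega) = t[0] ∧
      ∀ j (hj : j < t.length), u[i + j]'(by omega) ≤ t[j] := by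
  induction hsub with
  | slnil => simp at hne
  | @cons t l₂ a h ih =>
      obtain ⟨i, hi, hhead, hdom⟩ := ih (List.pairwise_cons.mp hpw).2 hne
      refine ⟨i + 1, by simp; omega, by simpa using hhead, ?_⟩
      intro j hj
      have := hdom j hj
      have hidx : i + 1 + j = (i + j) + 1 := by omega
      rw [getElem_idx_congr _ hidx]
      simpa using this
  | @cons₂ t l₂ a h ih =>
      refine ⟨0, by have := h.length_le; simp; omega, by simp, ?_⟩
      intro j hj
      match j with
      | 0 => simp
      | m + 1 =>
          simp only [Nat.zero_add, List.getElem_cons_succ]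
          exact sublist_getElem_ge h (List.pairwise_cons.mp hpw).2 m (by simpa using hj)

theorem sum_le_sum_pointwise (xs ys : List Int) (hlen : xs.length = ys.length)
    (h : ∀ j (hj : j < xs.length), xs[j] ≤ ys[j]'(by omega)) : xs.sum ≤ ys.sum := by
  induction xs generalizing ys with
  | nil =>
      have hnil : ys = [] := List.length_eq_zero_iff.mp hlen.symm
      simp [hnil]
  | cons x xs ih =>
      match ys with
      | y :: ys =>
          have hlen' : xs.length = ys.length := by simpa using hlen
          have h0 := h 0 (by simp)
          have ht := ih ys hlen'
            (fun j hj => by simpa using h (j + 1) (by simpa using Nat.succ_lt_succ hj))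
          simp only [List.sum_cons]
          simp only [List.getElem_cons_zero] at h0
          omega

theorem pvGet_eq (xs : List Int) (i : Int) (h0 : 0 ≤ i) (h : i < (xs.length : Int)) :
    pvGet xs i = xs[i.toNat]'(by omega) := by
  simp [pvGet, PySem.List.pyGet?_eq_some_getElem xs h0 h]

theorem getElem_window (s : List Int) (i K j : Nat) (hj : j < K) (h : i + K ≤ s.length) :
    ((s.drop i).take K)[j]'(by simp; omega) = s[i + j]'(by omega) := by
  simp [List.getElem_take, List.getElem_drop]

theorem foldl_minStep_eq_optMin {α : Type} (f : α → Int) (l : List α) :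
    l.foldl (fun acc x => minStep acc (f x)) none = optMin (l.map f) := by
  rw [optMin, List.foldl_map]

-- the heart: the combination scan and the window scan have the same running minimum
theorem best_eq (s : List Int) (d k : Int) (hpw : s.Pairwise (· ≤ ·)) (hk : 1 ≤ k) :
    ((PySem.Set.ofList (PySem.List.combinations s k.toNat)).foldl
      (fun acc perm =>
        if (PySem.List.max? perm (fun x => x)).getD 0 - (PySem.List.min? perm (fun x => x)).getD 0 ≤ d then
          some (match acc with
                | none => PySem.Int.floordiv perm.sum k
                | some m => min m (PySem.Int.floordiv perm.sum k))
        else acc) none)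
    = ((PySem.List.pyRange 0 ((s.length : Int) - k + 1) 1).foldl
      (fun acc i =>
        if pvGet s (i + k - 1) - pvGet s i ≤ d then
          let v := PySem.Int.floordiv (PySem.List.slice s (some i) (some (i + k))).sum k
          match acc with
          | none => some v
          | some m => if v < m then some v else some m
        else acc) none) := by
  have hstepA : (fun (acc : Option Int) (perm : List Int) =>
      if (PySem.List.max? perm (fun x => x)).getD 0 - (PySem.List.min? perm (fun x => x)).getD 0 ≤ d then
        some (match acc with
              | none => PySem.Int.floordiv perm.sum k
              | some m => min m (PySem.Int.floordiv perm.sum k))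
      else acc)
    = (fun acc perm =>
        if (PySem.List.max? perm (fun x => x)).getD 0 - (PySem.List.min? perm (fun x => x)).getD 0 ≤ d then
          minStep acc (PySem.Int.floordiv perm.sum k) else acc) := by
    funext acc perm
    by_cases hc : (PySem.List.max? perm (fun x => x)).getD 0 - (PySem.List.min? perm (fun x => x)).getD 0 ≤ d
    · simp only [if_pos hc]; cases acc <;> rfl
    · simp only [if_neg hc]
  have hstepB : (fun (acc : Option Int) (i : Int) =>
      if pvGet s (i + k - 1) - pvGet s i ≤ d then
        let v := PySem.Int.floordiv (PySem.List.slice s (some i) (some (i + k))).sum k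
        match acc with
        | none => some v
        | some m => if v < m then some v else some m
      else acc)
    = (fun acc i =>
        if pvGet s (i + k - 1) - pvGet s i ≤ d then
          minStep acc (PySem.Int.floordiv (PySem.List.slice s (some i) (some (i + k))).sum k)
        else acc) := by
    funext acc i
    by_cases hc : pvGet s (i + k - 1) - pvGet s i ≤ d
    · simp only [if_pos hc]
      cases acc with
      | none => rfl
      | some m =>
          show (if _ < m then _ else _) = _
          simp only [minStep]
          split_ifs with hv
          · rw [min_eq_right hv.le]
          · rw [min_eq_left (by omega : m ≤ _)]
    · simp only [if_neg hc]
  rw [hstepA, hstepB,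
      PySem.List.foldl_ite_eq_foldl_filter _ _ _ _,
      PySem.List.foldl_ite_eq_foldl_filter _ _ _ _,
      foldl_minStep_eq_optMin (fun (perm : List Int) => PySem.Int.floordiv perm.sum k),
      foldl_minStep_eq_optMin
        (fun (i : Int) => PySem.Int.floordiv (PySem.List.slice s (some i) (some (i + k))).sum k)]
  apply optMin_dominate
  · -- every surviving combination is dominated by a surviving window
    intro x hx
    simp only [List.mem_map, List.mem_filter, decide_eq_true_eq] at hx
    obtain ⟨cs, ⟨hcmem, hcval⟩, rfl⟩ := hx
    obtain ⟨hcsub, hclen⟩ :=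
      (PySem.List.mem_combinations_iff s k.toNat cs).mp ((PySem.Set.mem_ofList _ _).mp hcmem)
    have hcpw : cs.Pairwise (· ≤ ·) := hpw.sublist hcsub
    have hcne : 0 < cs.length := by omega
    obtain ⟨i, hle, hhead, hdom⟩ := window_dominates hcsub hpw hcne
    have hiK : i + k.toNat ≤ s.length := by omega
    have hslice : PySem.List.slice s (some (i : Int)) (some ((i : Int) + k))
        = (s.drop i).take k.toNat := by
      rw [PySem.List.slice_toNat s (by omega) (by omega)]
      have ht1 : ((i : Int)).toNat = i := by omega
      rw [ht1]
      have ht2 : ((i : Int) + k).toNat - i = k.toNat := by omega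
      rw [ht2]
    refine ⟨PySem.Int.floordiv ((s.drop i).take k.toNat).sum k, ?_, ?_⟩
    · simp only [List.mem_map, List.mem_filter, decide_eq_true_eq, PySem.List.mem_pyRange_one]
      refine ⟨(i : Int), ⟨⟨by omega, by omega⟩, ?_⟩, by rw [hslice]⟩
      have e0 : pvGet s ((i : Int)) = s[i]'(by omega) :=
        (pvGet_eq s _ (by omega) (by omega)).trans (getElem_idx_congr s (by omega) (by omega))
      have e1 : pvGet s ((i : Int) + k - 1) = s[i + k.toNat - 1]'(by omega) :=
        (pvGet_eq s _ (by omega) (by omega)).trans (getElem_idx_congr s (by omega) (by omega))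
      have e2 : s[i + k.toNat - 1]'(by omega) ≤ cs[k.toNat - 1]'(by omega) := by
        have h := hdom (k.toNat - 1) (by omega)
        have hidx : i + (k.toNat - 1) = i + k.toNat - 1 := by omega
        rw [getElem_idx_congr s hidx] at h
        exact h
      have e3 : s[i]'(by omega) = cs[0] := hhead
      have e4 : cs[cs.length - 1]'(by omega) - cs[0] ≤ d := by
        have hmax := maxD_sorted hcpw hcne
        have hmin := minD_sorted hcpw hcne
        rw [hmax, hmin] at hcval
        exact hcval
      have e5 : cs[cs.length - 1]'(by omega) = cs[k.toNat - 1]'(by omega) :=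
        getElem_idx_congr cs (by omega) (by omega)
      rw [e0, e1, e3]
      rw [e5] at e4
      linarith [e2, e4]
    · have hws : ((s.drop i).take k.toNat).sum ≤ cs.sum := by
        have hwl : ((s.drop i).take k.toNat).length = cs.length := by
          simp only [List.length_take, List.length_drop]
          omega
        refine sum_le_sum_pointwise _ _ hwl ?_
        intro j hj
        simp only [List.length_take, List.length_drop] at hj
        have hjK : j < k.toNat := by omega
        rw [getElem_window s i k.toNat j hjK hiK]
        exact hdom j (by omega)
      rw [PySem.Int.floordiv_eq_ediv_of_pos (by omega),
          PySem.Int.floordiv_eq_ediv_of_pos (by omega)]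
      exact Int.ediv_le_ediv (by omega) hws
  · -- every surviving window is itself a surviving combination
    intro y hy
    simp only [List.mem_map, List.mem_filter, decide_eq_true_eq,
      PySem.List.mem_pyRange_one] at hy
    obtain ⟨iZ, ⟨⟨hi0, hilt⟩, hival⟩, rfl⟩ := hy
    have hiK : iZ.toNat + k.toNat ≤ s.length := by omega
    have hwsub : ((s.drop iZ.toNat).take k.toNat).Sublist s :=
      ((s.drop iZ.toNat).take_sublist k.toNat).trans (s.drop_sublist iZ.toNat)
    have hwlen : ((s.drop iZ.toNat).take k.toNat).length = k.toNat := by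
      simp only [List.length_take, List.length_drop]
      omega
    have hslice : PySem.List.slice s (some iZ) (some (iZ + k))
        = (s.drop iZ.toNat).take k.toNat := by
      rw [PySem.List.slice_toNat s (by omega) (by omega)]
      have ht2 : (iZ + k).toNat - iZ.toNat = k.toNat := by omega
      rw [ht2]
    refine ⟨PySem.Int.floordiv (PySem.List.slice s (some iZ) (some (iZ + k))).sum k, ?_, le_refl _⟩
    simp only [List.mem_map, List.mem_filter, decide_eq_true_eq]
    refine ⟨(s.drop iZ.toNat).take k.toNat, ⟨?_, ?_⟩, by rw [hslice]⟩
    · exact (PySem.Set.mem_ofList _ _).mpr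
        ((PySem.List.mem_combinations_iff s k.toNat _).mpr ⟨hwsub, hwlen⟩)
    · have hwpw : ((s.drop iZ.toNat).take k.toNat).Pairwise (· ≤ ·) := hpw.sublist hwsub
      rw [maxD_sorted hwpw (by omega), minD_sorted hwpw (by omega)]
      rw [getElem_idx_congr ((s.drop iZ.toNat).take k.toNat)
            (show ((s.drop iZ.toNat).take k.toNat).length - 1 = k.toNat - 1 by rw [hwlen])]
      rw [getElem_window s iZ.toNat k.toNat (k.toNat - 1) (by omega) hiK,
          getElem_window s iZ.toNat k.toNat 0 (by omega) hiK]
      rw [getElem_idx_congr s (show iZ.toNat + (k.toNat - 1) = iZ.toNat + k.toNat - 1 by omega),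
          getElem_idx_congr s (show iZ.toNat + 0 = iZ.toNat by omega)]
      have p1 : pvGet s (iZ + k - 1) = s[iZ.toNat + k.toNat - 1]'(by omega) :=
        (pvGet_eq s _ (by omega) (by omega)).trans (getElem_idx_congr s (by omega) (by omega))
      have p0 : pvGet s iZ = s[iZ.toNat]'(by omega) :=
        (pvGet_eq s _ (by omega) (by omega)).trans (getElem_idx_congr s (by omega) (by omega))
      rw [p1, p0] at hival
      exact hival

theorem pvGet_len1 (s : List Int) (h : s.length = 1) : pvGet s (-1) = pvGet s 0 := by
  match s, h with
  | [a], _ => simp [pvGet, PySem.List.pyGet?_neg_one]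

-- ===== VERDICT (by name: the statement is the Claim_ definition above) =====
theorem solution_spec : Claim_equal_solution := by
  intro prices d k _ hpre
  unfold Pre_solution at hpre
  obtain ⟨hn1, hd1, hcrash, hdisj⟩ := hpre
  unfold Spec_solution
  simp only [solution, solution_alt]
  set s := PySem.List.sorted prices (fun x => x) false with hs
  have hpw : s.Pairwise (· ≤ ·) := by
    rw [hs]; simpa using PySem.List.sorted_pairwise prices (fun x => x)
  have hlens : s.length = prices.length := by
    rw [hs]; exact PySem.List.length_sorted prices (fun x => x) false
  by_cases h1 : pvGet s (-1) - pvGet s 0 ≤ d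
  · rw [if_pos h1, if_pos h1]
  · rw [if_neg h1, if_neg h1]
    by_cases h2 : pvGet s (-2) - pvGet s 1 ≤ d
    · rw [if_pos h2, if_pos h2]
    · rw [if_neg h2, if_neg h2]
      have hk : 1 ≤ k := by
        rcases hdisj with hk | hcond | ⟨hlen2, hcond⟩
        · exact hk
        · exact absurd hcond h1
        · exact absurd hcond h2
      have hn2 : 2 ≤ s.length := by
        by_contra hlt
        have hone : s.length = 1 := by omega
        apply h1
        rw [pvGet_len1 s hone]
        have hd0 := hd1 (by omega)
        omega
      have hfd : 1 ≤ PySem.Int.floordiv (s.length : Int) 2 :=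
        (PySem.Int.le_floordiv_iff_mul_le (by norm_num)).mpr (by push_cast; omega)
      rw [best_eq s d k hpw hk]
      split
      · next m hF => rw [hF]
      · next hF =>
          rw [hF]
          rw [if_pos (by omega : PySem.Int.floordiv (s.length : Int) 2 ≠ 0)]
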